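-- pv_equiv track=rewrite | github.com/Nitin-Gupta1109/engram | engram/ingestion/parser.py | is_assistant_reference
-- ===== SOURCE A (Python) =====
-- def is_assistant_reference(question: str) -> bool:
--     """Detect questions that ask about what the AI previously said."""
--     q = question.lower()
--     triggers = [
--         "you suggested",
--         "you told me",
--         "you mentioned",
--         "you said",
--         "you recommended",
--         "remind me what you",
--         "you provided",
--         "you listed",
--         "you gave me",
--         "you described",
--         "what did you",
--         "you came up with",
--         "you helped me",
--         "you explained",
--         "can you remind me",
--         "you identified",
--         "our previous conversation",
--         "our previous chat",
--         "our last conversation",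
--         "follow up on our",
--         "going back to our",
--         "looking back at our",
--     ]
--     return any(t in q for t in triggers)
-- ===== SOURCE B (Python) =====
-- # First-character dispatch: index the trigger phrases by their first letter,
-- # then scan the lowered question once, consulting only the bucket of the
-- # character at each position.
-- _BY_FIRST = {
--     "y": ["ou suggested", "ou told me", "ou mentioned", "ou said",
--           "ou recommended", "ou provided", "ou listed", "ou gave me",
--           "ou described", "ou came up with", "ou helped me",
--           "ou explained", "ou identified"],
--     "r": ["emind me what you"],
--     "w": ["hat did you"],
--     "c": ["an you remind me"],
--     "o": ["ur previous conversation", "ur previous chat",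
--           "ur last conversation"],
--     "f": ["ollow up on our"],
--     "g": ["oing back to our"],
--     "l": ["ooking back at our"],
-- }
--
-- def is_assistant_reference(question: str) -> bool:
--     """Detect questions that ask about what the AI previously said."""
--     q = question.lower()
--     for i, ch in enumerate(q):
--         rests = _BY_FIRST.get(ch)
--         if rests is not None and any(q.startswith(r, i + 1) for r in rests):
--             return True
--     return False
-- ===== Notes on version B (the rewrite author's own statement) =====
-- stated objective: alternative
-- what changed: Replaced A's 22 independent full substring searches with a single scan of the lowered string driven by a first-character index: at each position a dict lookup on the current character selects the (at most 13) trigger tails that could possibly match there, so most positions are dismissed with one hash lookup.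
import Mathlib
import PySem

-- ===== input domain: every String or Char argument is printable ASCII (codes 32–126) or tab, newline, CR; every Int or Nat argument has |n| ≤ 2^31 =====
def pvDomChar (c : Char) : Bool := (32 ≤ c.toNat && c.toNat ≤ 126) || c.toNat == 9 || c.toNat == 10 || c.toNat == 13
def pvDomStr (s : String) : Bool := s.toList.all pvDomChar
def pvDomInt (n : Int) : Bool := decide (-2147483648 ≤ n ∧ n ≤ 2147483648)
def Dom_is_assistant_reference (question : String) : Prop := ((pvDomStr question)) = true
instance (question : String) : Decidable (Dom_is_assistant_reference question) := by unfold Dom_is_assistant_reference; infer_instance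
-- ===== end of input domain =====

-- B replaces A's 22 independent full substring searches with one scan of the
-- lowered string driven by a first-character index of the trigger phrases
-- (objective: alternative).

-- ===== PORT A =====
-- A's trigger list and: any(t in q for t in triggers) — one full substring search per trigger
def pvTriggers : List String := [
  "you suggested",
  "you told me",
  "you mentioned",
  "you said",
  "you recommended",
  "remind me what you",
  "you provided",
  "you listed",
  "you gave me",
  "you described",
  "what did you",
  "you came up with",
  "you helped me",
  "you explained",
  "can you remind me",
  "you identified",
  "our previous conversation",
  "our previous chat",
  "our last conversation",
  "follow up on our",
  "going back to our",
  "looking back at our"]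

def is_assistant_reference (question : String) : Bool :=
  pvTriggers.any (fun t => PySem.Str.isIn t (PySem.Str.lower question))

-- ===== PORT B =====
-- B's first-character index: bucket of trigger tails keyed by the first letter
def pvByFirst : List (Char × List String) := [
  ('y', ["ou suggested", "ou told me", "ou mentioned", "ou said",
         "ou recommended", "ou provided", "ou listed", "ou gave me",
         "ou described", "ou came up with", "ou helped me",
         "ou explained", "ou identified"]),
  ('r', ["emind me what you"]),
  ('w', ["hat did you"]),
  ('c', ["an you remind me"]),
  ('o', ["ur previous conversation", "ur previous chat",
         "ur last conversation"]),
  ('f', ["ollow up on our"]),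
  ('g', ["oing back to our"]),
  ('l', ["ooking back at our"])]

-- _BY_FIRST.get(ch): first-match association lookup
def pvGetBucket : List (Char × List String) → Char → Option (List String)
  | [], _ => none
  | (c, rs) :: tb, ch => if ch == c then some rs else pvGetBucket tb ch

-- the scan loop over the lowered question's characters
def pvDispatchScan : List Char → Bool
  | [] => false
  | ch :: rest =>
    (match pvGetBucket pvByFirst ch with
     | none => false
     | some rs => rs.any (fun r => PySem.Chars.startswith rest r.toList)) ||
    pvDispatchScan rest

def is_assistant_reference_alt (question : String) : Bool :=
  pvDispatchScan (PySem.Str.lower question).toList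

-- ===== PRECONDITION & SPEC =====
def Spec_is_assistant_reference (question : String) (out : Bool) : Prop := out = is_assistant_reference_alt question
instance (question : String) (out : Bool) : Decidable (Spec_is_assistant_reference question out) := by unfold Spec_is_assistant_reference; infer_instance

-- ===== CLAIM (what is proved, stated in full; the proofs are below) =====
def Claim_equal_is_assistant_reference : Prop := ∀ (question : String), Dom_is_assistant_reference question → Spec_is_assistant_reference question (is_assistant_reference question)

-- ===== LEMMAS AND PROOFS =====

-- flattening a first-character index back into the full trigger list
def pvExpand (tb : List (Char × List String)) : List (List Char) :=
  tb.flatMap (fun p => p.2.map (fun s => p.1 :: s.toList))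

theorem pvExpand_perm : (pvExpand pvByFirst).Perm (pvTriggers.map String.toList) := by
  decide

theorem pvExpand_byFirst (t : List Char) :
    t ∈ pvExpand pvByFirst ↔ t ∈ pvTriggers.map String.toList :=
  pvExpand_perm.mem_iff

-- the bucket test at one position equals testing every expanded trigger as a prefix
theorem pvBucket_eq_expand (tb : List (Char × List String)) (ch : Char) (rest : List Char)
    (hnd : (tb.map Prod.fst).Nodup) :
    ((match pvGetBucket tb ch with
      | none => false
      | some rs => rs.any (fun r => PySem.Chars.startswith rest r.toList)) = true)
    ↔ ∃ t ∈ pvExpand tb, t <+: ch :: rest := by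
  induction tb with
  | nil => simp [pvGetBucket, pvExpand]
  | cons p tb ih =>
    obtain ⟨c, rs⟩ := p
    simp only [List.map_cons, List.nodup_cons, List.mem_map] at hnd
    obtain ⟨hc, hnd'⟩ := hnd
    by_cases h : ch = c
    · subst h
      simp only [pvGetBucket, beq_self_eq_true, if_true, pvExpand, List.flatMap_cons,
        List.mem_append, List.any_eq_true]
      constructor
      · rintro ⟨r, hr, hsw⟩
        exact ⟨ch :: r.toList, Or.inl (List.mem_map.mpr ⟨r, hr, rfl⟩),
          List.cons_prefix_cons.mpr ⟨rfl, (PySem.Chars.startswith_iff _ _).mp hsw⟩⟩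
      · rintro ⟨t, ht | ht, hp⟩
        · obtain ⟨r, hr, rfl⟩ := List.mem_map.mp ht
          exact ⟨r, hr, (PySem.Chars.startswith_iff _ _).mpr
            (List.cons_prefix_cons.mp hp).2⟩
        · -- a trigger from a later bucket starts with a key ≠ ch, so cannot prefix
          exfalso
          simp only [List.mem_flatMap, List.mem_map, Prod.exists] at ht
          obtain ⟨a, b, hm, r, hr, heq⟩ := ht
          rw [← heq] at hp
          have ha := (List.cons_prefix_cons.mp hp).1
          exact hc ⟨(a, b), hm, by simpa using ha⟩
    · have hbe : (ch == c) = false := beq_eq_false_iff_ne.mpr h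
      simp only [pvGetBucket, hbe, Bool.false_eq_true, if_false]
      rw [ih hnd']
      simp only [pvExpand, List.flatMap_cons, List.mem_append]
      constructor
      · rintro ⟨t, ht, hp⟩; exact ⟨t, Or.inr ht, hp⟩
      · rintro ⟨t, ht | ht, hp⟩
        · obtain ⟨r, hr, rfl⟩ := List.mem_map.mp ht
          exact absurd (List.cons_prefix_cons.mp hp).1 (Ne.symm h)
        · exact ⟨t, ht, hp⟩

-- the scan finds exactly: some trigger is a prefix of some suffix
theorem pvDispatchScan_iff (cs : List Char) :
    pvDispatchScan cs = true ↔ ∃ t ∈ pvTriggers.map String.toList, ∃ j, t <+: cs.drop j := by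
  induction cs with
  | nil =>
    simp only [pvDispatchScan, List.drop_nil, List.prefix_nil, Bool.false_eq_true, false_iff]
    rintro ⟨t, ht, _, rfl⟩
    revert ht; decide
  | cons ch rest ih =>
    have hnd : (pvByFirst.map Prod.fst).Nodup := by decide
    simp only [pvDispatchScan, Bool.or_eq_true, ih,
      pvBucket_eq_expand pvByFirst ch rest hnd]
    simp only [pvExpand_byFirst]
    constructor
    · rintro (⟨t, ht, hp⟩ | ⟨t, ht, j, hp⟩)
      · exact ⟨t, ht, 0, hp⟩
      · exact ⟨t, ht, j + 1, hp⟩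
    · rintro ⟨t, ht, j, hp⟩
      cases j with
      | zero => exact Or.inl ⟨t, ht, hp⟩
      | succ j => exact Or.inr ⟨t, ht, j, hp⟩

-- ===== VERDICT (by name: the statement is the Claim_ definition above) =====
theorem is_assistant_reference_spec : Claim_equal_is_assistant_reference := by
  intro question _
  unfold Spec_is_assistant_reference
  unfold is_assistant_reference is_assistant_reference_alt
  apply Bool.eq_iff_iff.mpr
  rw [pvDispatchScan_iff]
  simp only [List.any_eq_true, PySem.Str.isIn_iff_infix, List.mem_map]
  constructor
  · rintro ⟨t, ht, hinf⟩
    obtain ⟨j, hp⟩ := (PySem.Chars.exists_prefix_drop_iff_isIn _ _).mpr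
      ((PySem.Chars.isIn_iff_infix _ _).mpr hinf)
    exact ⟨t.toList, ⟨t, ht, rfl⟩, j, hp⟩
  · rintro ⟨tl, ⟨t, ht, rfl⟩, j, hp⟩
    refine ⟨t, ht, ?_⟩
    exact (PySem.Chars.isIn_iff_infix _ _).mp
      ((PySem.Chars.exists_prefix_drop_iff_isIn _ _).mp ⟨j, hp⟩)
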